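-- pv_equiv track=rewrite | github.com/DatTwenty3/qgis_export_gdb_helper | HoSoGIS.py | _sanitize_field_name
-- ===== SOURCE A (Python) =====
-- def _sanitize_field_name(value):
--     text = str(value).strip()
--     if not text:
--         return ""
--     for ch in '<>:"/\\|?*':
--         text = text.replace(ch, "_")
--     text = text.replace(" ", "_")
--     return text
-- ===== SOURCE B (Python) =====
-- BAD = frozenset('<>:"/\\|?* ')
--
--
-- def _sanitize_field_name(value):
--     text = str(value).strip()
--     if not text:
--         return ""
--     return "".join("_" if ch in BAD else ch for ch in text)
-- ===== Notes on version B (the rewrite author's own statement) =====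
-- stated objective: idiomatic
-- what changed: Replaces nine sequential full-string .replace passes (one per forbidden character) with a single pass over the text characters using frozenset membership, joining the result once.
import Mathlib
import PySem

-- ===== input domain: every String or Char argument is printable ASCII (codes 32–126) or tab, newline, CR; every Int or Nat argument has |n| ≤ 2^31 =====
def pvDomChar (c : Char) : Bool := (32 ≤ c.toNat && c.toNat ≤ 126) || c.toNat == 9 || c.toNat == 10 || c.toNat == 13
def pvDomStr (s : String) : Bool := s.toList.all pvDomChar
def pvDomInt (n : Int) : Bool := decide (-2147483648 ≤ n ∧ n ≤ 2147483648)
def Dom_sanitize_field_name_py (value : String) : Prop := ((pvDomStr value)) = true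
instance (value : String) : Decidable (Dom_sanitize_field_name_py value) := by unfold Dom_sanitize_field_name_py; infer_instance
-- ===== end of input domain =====

-- B replaces A's nine sequential .replace passes by a single pass with set membership (idiomatic; same cost class).

-- ===== PORT A =====
-- literal transliteration: strip, empty guard, a for-loop of single-char replaces, then the space replace
def sanitize_field_name_py (value : String) : String :=
  let text := PySem.Str.strip value
  if text = "" then ""
  else
    let text2 := ("<>:\"/\\|?*".toList).foldl
        (fun t ch => PySem.Str.replace t (String.ofList [ch]) "_") text
    PySem.Str.replace text2 " " "_"

-- ===== PORT B =====
-- BAD = frozenset('<>:"/\|?* ')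
def pvBad : PySem.Set Char := PySem.Set.ofList ("<>:\"/\\|?* ".toList)

-- "".join over the characters ported as String.ofList of the mapped character list
def sanitize_field_name_py_alt (value : String) : String :=
  let text := PySem.Str.strip value
  if text = "" then ""
  else String.ofList (text.toList.map (fun ch => if pvBad.contains ch then '_' else ch))

-- ===== PRECONDITION & SPEC =====
def Spec_sanitize_field_name_py (value : String) (out : String) : Prop := out = sanitize_field_name_py_alt value
instance (value : String) (out : String) : Decidable (Spec_sanitize_field_name_py value out) := by unfold Spec_sanitize_field_name_py; infer_instance

-- ===== CLAIM (what is proved, stated in full; the proofs are below) =====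
def Claim_equal_sanitize_field_name_py : Prop := ∀ (value : String), Dom_sanitize_field_name_py value → Spec_sanitize_field_name_py value (sanitize_field_name_py value)

-- ===== LEMMAS AND PROOFS =====

-- replace.go with a single-char pattern is a pointwise map (given enough fuel)
theorem pv_go_single (a r : Char) :
    ∀ (s acc : List Char) (fuel : Nat), s.length ≤ fuel →
      PySem.Chars.replace.go [a] [r] fuel s acc
        = acc.reverse ++ s.map (fun c => if c = a then r else c) := by
  intro s
  induction s with
  | nil =>
      intro acc fuel _
      cases fuel <;> simp [PySem.Chars.replace.go]
  | cons c t ih =>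
      intro acc fuel hfuel
      cases fuel with
      | zero => simp at hfuel
      | succ n =>
          have hn : t.length ≤ n := by simpa using hfuel
          by_cases hca : c = a
          · subst hca
            simp [PySem.Chars.replace.go, List.isPrefixOf, ih (r :: acc) n hn]
          · have : ([a].isPrefixOf (c :: t)) = false := by
              simp [List.isPrefixOf]
              exact fun h => hca h.symm
            simp [PySem.Chars.replace.go, this, ih (c :: acc) n hn, hca]

theorem pv_replace_single (a r : Char) (s : List Char) :
    PySem.Chars.replace s [a] [r] = s.map (fun c => if c = a then r else c) := by
  simpa using pv_go_single a r s [] s.length le_rfl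

-- a fold of pointwise maps is a map of the pointwise fold
theorem pv_foldl_map (L : List Char) :
    ∀ (cs : List Char),
      L.foldl (fun t ch => t.map (fun c => if c = ch then '_' else c)) cs
        = cs.map (fun c => L.foldl (fun x ch => if x = ch then '_' else x) c) := by
  induction L with
  | nil => intro cs; simp
  | cons a L' ih =>
      intro cs
      simp [List.foldl_cons, ih, List.map_map, Function.comp_def]

-- the pointwise fold over the ten concrete characters is the set-membership test
theorem pv_pointwise (c : Char) :
    (['<','>',':','"','/','\\','|','?','*',' ']).foldl (fun x ch => if x = ch then '_' else x) c
      = if pvBad.contains c then '_' else c := by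
  by_cases h1 : c = '<'; · subst h1; decide
  by_cases h2 : c = '>'; · subst h2; decide
  by_cases h3 : c = ':'; · subst h3; decide
  by_cases h4 : c = '"'; · subst h4; decide
  by_cases h5 : c = '/'; · subst h5; decide
  by_cases h6 : c = '\\'; · subst h6; decide
  by_cases h7 : c = '|'; · subst h7; decide
  by_cases h8 : c = '?'; · subst h8; decide
  by_cases h9 : c = '*'; · subst h9; decide
  by_cases h10 : c = ' '; · subst h10; decide
  have hb : pvBad.contains c = false := by
    have : pvBad = ['<','>',':','"','/','\\','|','?','*',' '] := by decide
    simp [this, PySem.Set.contains, h1, h2, h3, h4, h5, h6, h7, h8, h9, h10]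
  rw [hb]
  simp only [List.foldl_cons, List.foldl_nil, Bool.false_eq_true, if_false]
  rw [if_neg h1, if_neg h2, if_neg h3, if_neg h4, if_neg h5, if_neg h6, if_neg h7, if_neg h8,
    if_neg h9, if_neg h10]

theorem pv_main (value : String) :
    (sanitize_field_name_py value) = sanitize_field_name_py_alt value := by
  unfold sanitize_field_name_py sanitize_field_name_py_alt
  simp only []
  generalize PySem.Str.strip value = text
  by_cases h : text = ""
  · simp [h]
  · simp only [h, if_false]
    apply String.ext
    simp only [PySem.Str.toList_replace]
    -- push the nine String-level replaces down to Chars-level ones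
    have hfold :
        (("<>:\"/\\|?*".toList).foldl
            (fun t ch => PySem.Str.replace t (String.ofList [ch]) "_") text).toList
          = ("<>:\"/\\|?*".toList).foldl
            (fun t ch => PySem.Chars.replace t [ch] ['_']) text.toList := by
      generalize text = t0
      induction ("<>:\"/\\|?*".toList) generalizing t0 with
      | nil => simp
      | cons a L ih =>
          simp only [List.foldl_cons, ih, PySem.Str.toList_replace]
          rw [String.toList_ofList, show ("_" : String).toList = ['_'] from rfl]
    rw [hfold, show (" " : String).toList = [' '] from rfl,
      show ("_" : String).toList = ['_'] from rfl]
    -- fold the trailing space-replace into the fold: nine chars ++ [' ']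
    have happ :
        PySem.Chars.replace
            (("<>:\"/\\|?*".toList).foldl
              (fun t ch => PySem.Chars.replace t [ch] ['_']) text.toList) [' '] ['_']
          = ("<>:\"/\\|?* ".toList).foldl
              (fun t ch => PySem.Chars.replace t [ch] ['_']) text.toList := by
      rw [show ("<>:\"/\\|?* ".toList) = ("<>:\"/\\|?*".toList) ++ [' '] from rfl,
        List.foldl_append]
      simp
    rw [happ]
    -- each single-char replace is a map, the fold of maps is one map
    have hmap :
        ("<>:\"/\\|?* ".toList).foldl
            (fun t ch => PySem.Chars.replace t [ch] ['_']) text.toList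
          = ("<>:\"/\\|?* ".toList).foldl
            (fun t ch => t.map (fun c => if c = ch then '_' else c)) text.toList := by
      generalize text.toList = t0
      induction ("<>:\"/\\|?* ".toList) generalizing t0 with
      | nil => simp
      | cons a L ih => rw [List.foldl_cons, List.foldl_cons, pv_replace_single, ih]
    rw [hmap, pv_foldl_map]
    simp only [String.toList_ofList]
    exact List.map_congr_left fun c _ => pv_pointwise c

-- ===== VERDICT (by name: the statement is the Claim_ definition above) =====
theorem sanitize_field_name_py_spec : Claim_equal_sanitize_field_name_py := by
  intro value _
  unfold Spec_sanitize_field_name_py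
  exact pv_main value
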